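-- pv_equiv track=rewrite | github.com/Moha02/CoderHub_Python | CoderHub/leftDigit.py | left_digit
-- ===== SOURCE A (Python) =====
-- def left_digit(strParam: str) -> int:
--     # write your code here ^_^
--
--     newstr = ''.join((ch if ch in '0123456789' else ' ') for ch in strParam)
--     listOfNumbers = []
--     try:
--         for i in newstr.split():
--             listOfNumbers.append(int(i[0]))
--
--     except ValueError as e:
--         pass
--     return listOfNumbers[0]
-- ===== SOURCE B (Python) =====
-- def left_digit(strParam: str) -> int:
--     return [int(ch) for ch in strParam if ch in '0123456789'][0]
-- ===== Notes on version B (the rewrite author's own statement) =====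
-- stated objective: simpler
-- what changed: B drops A's translate-to-spaces/split-into-groups/parse-each-group pipeline and its try/except, and instead filters the digit characters in one comprehension and returns the first.
import Mathlib
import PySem

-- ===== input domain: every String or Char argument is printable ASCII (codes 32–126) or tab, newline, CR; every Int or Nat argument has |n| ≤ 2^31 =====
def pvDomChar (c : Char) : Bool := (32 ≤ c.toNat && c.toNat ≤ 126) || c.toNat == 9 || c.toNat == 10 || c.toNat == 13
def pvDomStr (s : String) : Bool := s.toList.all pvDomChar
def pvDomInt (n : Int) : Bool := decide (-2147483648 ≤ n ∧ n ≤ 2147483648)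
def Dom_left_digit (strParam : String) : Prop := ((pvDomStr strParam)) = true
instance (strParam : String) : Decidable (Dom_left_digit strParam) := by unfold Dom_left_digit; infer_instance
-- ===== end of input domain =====

-- B replaces A's translate-to-spaces / split-into-groups / parse-each-group pipeline (with its
-- try/except) by a single comprehension over the characters: collect the digit characters as ints
-- and return the first (objective: simpler).

-- ===== PORT A =====
def pvDigits : List Char := ['0','1','2','3','4','5','6','7','8','9']

-- for-loop over the groups; ValueError from int(...) (= ofStr? none) stops the loop keeping acc
-- (groups produced by split() are nonempty, so i[0]'s pyGetD default ' ' is never used)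
def pvLeftA : List (List Char) → List Int → List Int
  | [], acc => acc
  | g :: gs, acc =>
    match PySem.Int.ofStr? (String.ofList [PySem.List.pyGetD g 0 ' ']) with
    | some n => pvLeftA gs (acc ++ [n])
    | none => acc

def left_digit (strParam : String) : Int :=
  let newstr := strParam.toList.map (fun ch => if ch ∈ pvDigits then ch else ' ')
  let listOfNumbers := pvLeftA (PySem.Chars.split₀ newstr) []
  -- listOfNumbers[0]; IndexError (empty list) excluded by Pre_left_digit
  PySem.List.pyGetD listOfNumbers 0 0

-- ===== PORT B =====
def left_digit_alt (strParam : String) : Int :=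
  let ds := strParam.toList.filterMap
    (fun ch => if ch ∈ pvDigits then some ((ch.toNat : Int) - 48) else none)
  -- ds[0]; IndexError (empty list) excluded by Pre_left_digit
  PySem.List.pyGetD ds 0 0

-- ===== PRECONDITION & SPEC =====
-- Pre_ excludes exactly the strings with no ASCII digit, on which both A and B raise IndexError.
def Pre_left_digit (strParam : String) : Prop := (strParam.toList.any (fun c => pvDigits.contains c)) = true
instance (strParam : String) : Decidable (Pre_left_digit strParam) := by unfold Pre_left_digit; infer_instance
def pvWitness_left_digit : String := "ab3c"

def Spec_left_digit (strParam : String) (out : Int) : Prop := out = left_digit_alt strParam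
instance (strParam : String) (out : Int) : Decidable (Spec_left_digit strParam out) := by unfold Spec_left_digit; infer_instance

-- ===== CLAIM (what is proved, stated in full; the proofs are below) =====
def Claim_equal_left_digit : Prop := ∀ (strParam : String), Dom_left_digit strParam → Pre_left_digit strParam → Spec_left_digit strParam (left_digit strParam)

-- ===== LEMMAS AND PROOFS =====

theorem pv_digit_facts (c : Char) (hc : c ∈ pvDigits) :
    PySem.Chars.isspace c = false ∧
    PySem.Int.ofStr? (String.ofList [c]) = some ((c.toNat : Int) - 48) := by
  fin_cases hc <;> exact ⟨by decide, by decide⟩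

theorem pvLeftA_append (gs : List (List Char)) (acc : List Int) :
    pvLeftA gs acc = acc ++ pvLeftA gs [] := by
  induction gs generalizing acc with
  | nil => simp [pvLeftA]
  | cons g gs ih =>
    simp only [pvLeftA]
    cases PySem.Int.ofStr? (String.ofList [PySem.List.pyGetD g 0 ' ']) with
    | none => simp
    | some n =>
      dsimp only
      rw [ih (acc ++ [n]), ih ([] ++ [n])]; simp

theorem pv_go_acc (s : List Char) (cur : List Char) (acc : List (List Char)) :
    PySem.Chars.split₀.go s cur acc = acc.reverse ++ PySem.Chars.split₀.go s cur [] := by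
  induction s generalizing cur acc with
  | nil =>
    simp only [PySem.Chars.split₀.go]
    by_cases h : cur.isEmpty <;> simp [h]
  | cons c s ih =>
    simp only [PySem.Chars.split₀.go]
    by_cases hs : PySem.Chars.isspace c
    · by_cases he : cur.isEmpty
      · simp [hs, he, ih [] acc]
      · simp only [hs, he, if_true, if_false, Bool.false_eq_true]
        rw [ih [] (cur.reverse :: acc), ih [] [cur.reverse]]
        simp
    · simp only [hs, Bool.false_eq_true, if_false]
      exact ih (c :: cur) acc

-- first group of go on a masked tail, when the current run ends (in reversed order) with digit d
theorem pv_first_group (cs : List Char) (cur : List Char) (d : Char) :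
    ∃ g gs, PySem.Chars.split₀.go
        (cs.map (fun ch => if ch ∈ pvDigits then ch else ' ')) (cur ++ [d]) [] = g :: gs ∧
      g.head? = some d := by
  induction cs generalizing cur with
  | nil =>
    refine ⟨d :: cur.reverse, [], ?_, rfl⟩
    simp [PySem.Chars.split₀.go]
  | cons c cs ih =>
    by_cases hc : c ∈ pvDigits
    · have hsp := (pv_digit_facts c hc).1
      simpa [PySem.Chars.split₀.go, hc, hsp] using ih (c :: cur)
    · have : PySem.Chars.isspace ' ' = true := by decide
      simp only [List.map_cons, if_neg hc, PySem.Chars.split₀.go, this, if_true]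
      have hne : (cur ++ [d]).isEmpty = false := by simp
      rw [hne]
      simp only [Bool.false_eq_true, if_false]
      rw [pv_go_acc]
      refine ⟨d :: cur.reverse,
        PySem.Chars.split₀.go (cs.map (fun ch => if ch ∈ pvDigits then ch else ' ')) [] [],
        by simp, rfl⟩

theorem pv_A_head (cs : List Char) (d : Char)
    (h : cs.find? (fun c => c ∈ pvDigits) = some d) :
    ∃ rest, pvLeftA (PySem.Chars.split₀
        (cs.map (fun ch => if ch ∈ pvDigits then ch else ' '))) [] =
      ((d.toNat : Int) - 48) :: rest := by
  induction cs with
  | nil => simp at h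
  | cons c cs ih =>
    by_cases hc : c ∈ pvDigits
    · have hd : d = c := by
        rw [List.find?_cons_of_pos (by simpa using hc)] at h
        exact (Option.some_inj.mp h).symm
      subst hd
      obtain ⟨hsp, hint⟩ := pv_digit_facts d hc
      obtain ⟨g, gs, hg, hh⟩ := pv_first_group cs [] d
      obtain ⟨t, ht⟩ : ∃ t, g = d :: t := by
        cases g with
        | nil => simp at hh
        | cons a t =>
          simp only [List.head?_cons, Option.some_inj] at hh
          exact ⟨t, by rw [hh]⟩
      have hsplit : PySem.Chars.split₀
          ((d :: cs).map (fun ch => if ch ∈ pvDigits then ch else ' ')) = g :: gs := by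
        simpa [PySem.Chars.split₀, PySem.Chars.split₀.go, hc, hsp] using hg
      rw [hsplit, ht]
      simp only [pvLeftA, PySem.List.pyGetD_zero_cons, hint]
      exact ⟨pvLeftA gs [], by rw [pvLeftA_append]; simp⟩
    · rw [List.find?_cons_of_neg (by simpa using hc)] at h
      have : PySem.Chars.isspace ' ' = true := by decide
      simpa [PySem.Chars.split₀, PySem.Chars.split₀.go, hc, this] using ih h

theorem pv_B_head (cs : List Char) (d : Char)
    (h : cs.find? (fun c => c ∈ pvDigits) = some d) :
    ∃ rest, cs.filterMap
        (fun ch => if ch ∈ pvDigits then some ((ch.toNat : Int) - 48) else none) =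
      ((d.toNat : Int) - 48) :: rest := by
  induction cs with
  | nil => simp at h
  | cons c cs ih =>
    by_cases hc : c ∈ pvDigits
    · have hd : d = c := by
        rw [List.find?_cons_of_pos (by simpa using hc)] at h
        exact (Option.some_inj.mp h).symm
      subst hd
      refine ⟨cs.filterMap (fun ch => if ch ∈ pvDigits then some ((ch.toNat : Int) - 48) else none), ?_⟩
      simp [hc]
    · rw [List.find?_cons_of_neg (by simpa using hc)] at h
      obtain ⟨rest, hr⟩ := ih h
      exact ⟨rest, by simp [hc, hr]⟩

-- ===== VERDICT (by name: the statement is the Claim_ definition above) =====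
theorem left_digit_spec : Claim_equal_left_digit := by
  intro s _ hpre
  obtain ⟨c, hcmem, hcdig⟩ := List.any_eq_true.mp hpre
  have hfind : (s.toList.find? (fun c => c ∈ pvDigits)).isSome := by
    rw [List.find?_isSome]
    exact ⟨c, hcmem, by simpa using hcdig⟩
  obtain ⟨d, hd⟩ := Option.isSome_iff_exists.mp hfind
  obtain ⟨ra, hra⟩ := pv_A_head s.toList d hd
  obtain ⟨rb, hrb⟩ := pv_B_head s.toList d hd
  show left_digit s = left_digit_alt s
  simp only [left_digit, left_digit_alt, hra, hrb, PySem.List.pyGetD_zero_cons]
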